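-- pv_equiv track=rewrite | github.com/ttzytt/PyAutoGrade | tests/Block 4/tested_code/1349/Unit 1/Cards/card_functions.py | uno_who_played_what
-- ===== SOURCE A (Python) =====
-- def uno_who_played_what(cards_played, num_players = 4, starting_player = 0):
--
--
--
--
--
--
--     hands = []
--
--
--     for i in range(num_players):
--         hands.append([])
--
--
--
--
--     list_index_revision = 0 - starting_player
--
--     number_reverse = 0
--
--     for i in range(len(cards_played)):
--
--         hands[(i - list_index_revision) % num_players].append(cards_played[i])
--
--
--         if cards_played[i] == 'reverse':
--             number_reverse += 1
--
--
--         elif cards_played[i] == 'skip':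
--
--
--             if number_reverse % 2 == 1:
--                 list_index_revision += 1
--             else:
--                 list_index_revision -= 1
--
--
--
--         if number_reverse % 2 == 1:
--
--
--             list_index_revision += 2
--
--     return hands
-- ===== SOURCE B (Python) =====
-- def uno_who_played_what(cards_played, num_players=4, starting_player=0):
--     n = len(cards_played)
--     # staged, stateless computation: per-card sign/offset by comprehensions, then group-by
--     revs = [1 if c == 'reverse' else 0 for c in cards_played]
--     signs = [(-1) ** sum(revs[:i + 1]) for i in range(n)]
--     deltas = [2 * s if c == 'skip' else s for c, s in zip(cards_played, signs)]
--     seats = [(starting_player + sum(deltas[:i])) % num_players for i in range(n)]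
--     return [[c for c, k in zip(cards_played, seats) if k == j] for j in range(num_players)]
-- ===== Notes on version B (the rewrite author's own statement) =====
-- stated objective: alternative
-- what changed: Replaces A's single mutating pass (append into hands via a reverse-parity counter and an index-revision offset) by a staged stateless pipeline: comprehensions compute each card's sign from the reverse-count prefix, its step, its seat from a prefix sum, and the hands are then built per player by a group-by filter; trades O(n) for O(n^2 + n*p) in exchange for a loop-free, state-free formulation.
import Mathlib
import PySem

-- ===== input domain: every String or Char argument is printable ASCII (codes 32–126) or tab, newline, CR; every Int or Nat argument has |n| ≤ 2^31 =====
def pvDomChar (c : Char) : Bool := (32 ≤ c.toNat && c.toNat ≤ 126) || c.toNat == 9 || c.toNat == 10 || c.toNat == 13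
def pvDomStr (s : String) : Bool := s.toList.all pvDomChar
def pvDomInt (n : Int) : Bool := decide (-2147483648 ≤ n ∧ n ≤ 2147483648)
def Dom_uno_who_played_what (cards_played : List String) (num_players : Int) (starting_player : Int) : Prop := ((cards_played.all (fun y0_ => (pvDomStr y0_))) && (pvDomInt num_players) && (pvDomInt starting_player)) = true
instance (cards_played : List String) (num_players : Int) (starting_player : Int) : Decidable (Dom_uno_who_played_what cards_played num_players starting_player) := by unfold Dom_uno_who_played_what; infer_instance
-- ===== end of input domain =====

-- B replaces A's single mutating pass (reverse-parity counter + index-revision offset) by a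
-- staged stateless pipeline: per-card signs, steps and seats via comprehensions over prefixes,
-- then hands built per player by a group-by filter (objective: alternative, not faster).

-- ===== PORT A =====
-- loop body of A's 'for i in range(len(cards_played))', state (hands, list_index_revision, number_reverse)
def pvStepA (cards_played : List String) (num_players : Int)
    (s : List (List String) × Int × Int) (i : Nat) : List (List String) × Int × Int :=
  let hands := s.1
  let rev := s.2.1
  let nrev := s.2.2
  let c := cards_played.getD i ""
  -- hands[(i - list_index_revision) % num_players].append(cards_played[i])
  let hands := hands.modify (PySem.Int.mod ((i : Int) - rev) num_players).toNat (fun h => h ++ [c])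
  let p : Int × Int :=
    if c = "reverse" then (rev, nrev + 1)
    else if c = "skip" then
      (if PySem.Int.mod nrev 2 = 1 then rev + 1 else rev - 1, nrev)
    else (rev, nrev)
  let rev' := if PySem.Int.mod p.2 2 = 1 then p.1 + 2 else p.1
  (hands, rev', p.2)

def uno_who_played_what (cards_played : List String) (num_players : Int) (starting_player : Int) : List (List String) :=
  let hands : List (List String) := (PySem.List.pyRange 0 num_players 1).map (fun _ => [])
  ((List.range cards_played.length).foldl (pvStepA cards_played num_players)
      (hands, 0 - starting_player, 0)).1

-- ===== PORT B =====
-- transliteration of Source B: revs/signs/deltas/seats by comprehensions, then group-by per player.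
-- sum(revs[:i+1]) is a count of Python ints 0/1, carried here as Nat (the exponent of (-1)).
def uno_who_played_what_alt (cards_played : List String) (num_players : Int) (starting_player : Int) : List (List String) :=
  let n := cards_played.length
  let revs : List Nat := cards_played.map (fun c => if c = "reverse" then 1 else 0)
  let signs : List Int := (List.range n).map (fun i => (-1 : Int) ^ ((revs.take (i + 1)).sum))
  let deltas : List Int := (cards_played.zip signs).map (fun p => if p.1 = "skip" then 2 * p.2 else p.2)
  let seats : List Int := (List.range n).map (fun i => PySem.Int.mod (starting_player + (deltas.take i).sum) num_players)
  (PySem.List.pyRange 0 num_players 1).map (fun j =>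
    (cards_played.zip seats).filterMap (fun p => if p.2 = j then some p.1 else none))

-- ===== PRECONDITION & SPEC =====
-- Pre_ excludes num_players ≤ 0 with a nonempty card list: there the Python A raises
-- (ZeroDivisionError for num_players = 0, IndexError for negative num_players).
def Pre_uno_who_played_what (cards_played : List String) (num_players : Int) (starting_player : Int) : Prop :=
  cards_played = [] ∨ 0 < num_players
instance (cards_played : List String) (num_players : Int) (starting_player : Int) : Decidable (Pre_uno_who_played_what cards_played num_players starting_player) := by unfold Pre_uno_who_played_what; infer_instance

def pvWitness_uno_who_played_what : List String × Int × Int := (["red 5", "reverse", "skip"], 4, 1)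

def Spec_uno_who_played_what (cards_played : List String) (num_players : Int) (starting_player : Int) (out : List (List String)) : Prop := out = uno_who_played_what_alt cards_played num_players starting_player
instance (cards_played : List String) (num_players : Int) (starting_player : Int) (out : List (List String)) : Decidable (Spec_uno_who_played_what cards_played num_players starting_player out) := by unfold Spec_uno_who_played_what; infer_instance

-- ===== CLAIM (what is proved, stated in full; the proofs are below) =====
def Claim_equal_uno_who_played_what : Prop := ∀ (cards_played : List String) (num_players : Int) (starting_player : Int), Dom_uno_who_played_what cards_played num_players starting_player → Pre_uno_who_played_what cards_played num_players starting_player → Spec_uno_who_played_what cards_played num_players starting_player (uno_who_played_what cards_played num_players starting_player)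

-- ===== LEMMAS AND PROOFS =====

-- per-card direction factor and step magnitude
def pvSgn (c : String) : Int := if c = "reverse" then -1 else 1
def pvMag (c : String) : Int := if c = "skip" then 2 else 1

-- intermediate (pos, dir) state machine bridging the two programs
def pvStepB (num_players : Int)
    (s : List (List String) × Int × Int) (c : String) : List (List String) × Int × Int :=
  let hands := s.1.modify (PySem.Int.mod s.2.1 num_players).toNat (fun h => h ++ [c])
  if c = "reverse" then
    let d := -s.2.2
    (hands, s.2.1 + d, d)
  else if c = "skip" then (hands, s.2.1 + 2 * s.2.2, s.2.2)
  else (hands, s.2.1 + s.2.2, s.2.2)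

-- cards handed to player j when play starts at pos with direction dir
def pvGrp (np j : Int) (pos dir : Int) : List String → List String
  | [] => []
  | c :: rest =>
      (if PySem.Int.mod pos np = j then [c] else []) ++
      pvGrp np j (pos + pvMag c * (dir * pvSgn c)) (dir * pvSgn c) rest

-- seat of each card in order, as a scan
def pvSeats (np pos dir : Int) : List String → List Int
  | [] => []
  | c :: rest => PySem.Int.mod pos np :: pvSeats np (pos + pvMag c * (dir * pvSgn c)) (dir * pvSgn c) rest

-- B's delta list (dir = 1), as a recursion
def pvDeltas : List String → List Int
  | [] => []
  | c :: rest => (pvMag c * pvSgn c) :: (pvDeltas rest).map (fun d => pvSgn c * d)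

-- B's direction as a function of A's reverse counter
def pvDir (nrev : Int) : Int := if PySem.Int.mod nrev 2 = 1 then -1 else 1

theorem pv_mod_two (n : Int) : PySem.Int.mod n 2 = n % 2 :=
  PySem.Int.mod_eq_emod_of_pos (by norm_num)

-- state correspondence: after processing the same cards, B's pos is i - rev and d = pvDir nrev
theorem pv_key (cards : List String) (np : Int) :
    ∀ (rest : List String) (i : Nat) (hands : List (List String)) (rev nrev : Int),
      cards.drop i = rest →
      ((List.range' i rest.length).foldl (pvStepA cards np) (hands, rev, nrev)).1
        = (rest.foldl (pvStepB np) (hands, (i : Int) - rev, pvDir nrev)).1 := by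
  intro rest
  induction rest with
  | nil => intro i hands rev nrev _; simp
  | cons c rest' ih =>
    intro i hands rev nrev hdrop
    have hget : cards[i]? = some c := by
      have h0 : (List.drop i cards)[0]? = some c := by rw [hdrop]; rfl
      rw [List.getElem?_drop] at h0
      simpa using h0
    have hgetD : cards.getD i "" = c := by
      simp [List.getD, hget]
    have hdrop' : cards.drop (i + 1) = rest' := by
      have h1 : List.drop 1 (List.drop i cards) = rest' := by rw [hdrop]; rfl
      rw [List.drop_drop] at h1
      simpa [Nat.add_comm] using h1
    have hrange : List.range' i (c :: rest').length = i :: List.range' (i + 1) rest'.length := by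
      simp [List.range'_succ]
    rw [hrange]
    simp only [List.foldl_cons]
    rw [ih (i + 1) _ _ _ hdrop']
    congr 1
    unfold pvStepA pvStepB pvDir
    simp only [hgetD, pv_mod_two]
    have hpar : nrev % 2 = 0 ∨ nrev % 2 = 1 := by omega
    by_cases hc1 : c = "reverse"
    · rcases hpar with hp | hp <;>
        simp [hc1, hp, Int.add_emod] <;>
        ring_nf
    · by_cases hc2 : c = "skip"
      · rcases hpar with hp | hp <;>
          simp [hc2, hp] <;>
          ring_nf
      · rcases hpar with hp | hp <;>
          simp [hc1, hc2, hp] <;>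
          ring_nf

-- the one-step shape of pvStepB, phrased through pvSgn/pvMag
theorem pv_stepB_eq (np : Int) (s : List (List String) × Int × Int) (c : String) :
    pvStepB np s c =
      (s.1.modify (PySem.Int.mod s.2.1 np).toNat (fun h => h ++ [c]),
       s.2.1 + pvMag c * (s.2.2 * pvSgn c), s.2.2 * pvSgn c) := by
  by_cases h1 : c = "reverse"
  · simp [pvStepB, pvMag, pvSgn, h1]
  · by_cases h2 : c = "skip"
    · simp [pvStepB, pvMag, pvSgn, h2]
    · simp [pvStepB, pvMag, pvSgn, h1, h2]

theorem pv_foldB_len (np : Int) :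
    ∀ (cards : List String) (s : List (List String) × Int × Int),
      ((cards.foldl (pvStepB np) s).1).length = s.1.length := by
  intro cards
  induction cards with
  | nil => intro s; rfl
  | cons c rest ih =>
    intro s
    simp [List.foldl_cons, ih, pv_stepB_eq]

-- distributing the fold: each bucket collects exactly its group
theorem pv_foldB_get (np : Int) (hnp : 0 < np) :
    ∀ (cards : List String) (hands : List (List String)) (pos dir : Int) (idx : Nat)
      (h : idx < hands.length),
      ((cards.foldl (pvStepB np) (hands, pos, dir)).1)[idx]? =
        some (hands[idx] ++ pvGrp np (idx : Int) pos dir cards) := by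
  intro cards
  induction cards with
  | nil => intro hands pos dir idx h; simp [pvGrp, List.getElem?_eq_getElem h]
  | cons c rest ih =>
    intro hands pos dir idx h
    simp only [List.foldl_cons, pv_stepB_eq]
    have hlen : idx < (hands.modify (PySem.Int.mod pos np).toNat (fun h => h ++ [c])).length := by
      simpa using h
    rw [ih _ _ _ idx hlen]
    have hm0 : 0 ≤ PySem.Int.mod pos np := PySem.Int.mod_nonneg pos hnp
    by_cases he : PySem.Int.mod pos np = (idx : Int)
    · have hek : (PySem.Int.mod pos np).toNat = idx := by omega
      rw [List.getElem_modify]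
      simp [pvGrp, he, hek]
    · have hek : (PySem.Int.mod pos np).toNat ≠ idx := by omega
      rw [List.getElem_modify]
      simp [pvGrp, he, hek]

-- the group is the zip-filter against the seat list
theorem pv_grp_eq_filter (np : Int) :
    ∀ (cards : List String) (pos dir j : Int),
      pvGrp np j pos dir cards =
        (cards.zip (pvSeats np pos dir cards)).filterMap
          (fun p => if p.2 = j then some p.1 else none) := by
  intro cards
  induction cards with
  | nil => intro pos dir j; simp [pvGrp, pvSeats]
  | cons c rest ih =>
    intro pos dir j
    by_cases he : PySem.Int.mod pos np = j <;>
      simp [pvGrp, pvSeats, he, ih]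

-- B's sign list, recursively
def pvSigns : List String → List Int
  | [] => []
  | c :: rest => pvSgn c :: (pvSigns rest).map (fun s => pvSgn c * s)

theorem pv_signs_eq (cards : List String) :
    (List.range cards.length).map
        (fun i => (-1 : Int) ^ (((cards.map (fun c => if c = "reverse" then 1 else 0)).take (i + 1)).sum)) =
      pvSigns cards := by
  induction cards with
  | nil => simp [pvSigns]
  | cons c rest ih =>
    have hsgn : ((-1:Int)) ^ (if c = "reverse" then 1 else 0) = pvSgn c := by
      by_cases hc : c = "reverse" <;> simp [pvSgn, hc]
    simp only [List.length_cons, List.range_succ_eq_map, List.map_cons, List.map_map, pvSigns]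
    refine List.cons_eq_cons.mpr ⟨by simpa using hsgn, ?_⟩
    rw [← ih, List.map_map]
    apply List.map_congr_left
    intro i _
    simp [Function.comp, pow_add, hsgn]

theorem pv_deltas_eq (cards : List String) :
    (cards.zip (pvSigns cards)).map (fun p => if p.1 = "skip" then 2 * p.2 else p.2) =
      pvDeltas cards := by
  induction cards with
  | nil => simp [pvDeltas]
  | cons c rest ih =>
    simp only [pvSigns, pvDeltas, List.zip_cons_cons, List.map_cons]
    refine List.cons_eq_cons.mpr ⟨?_, ?_⟩
    · by_cases hc : c = "skip" <;> simp [pvMag, hc, mul_comm]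
    · rw [List.zip_map_right, List.map_map, ← ih, List.map_map]
      apply List.map_congr_left
      intro p _
      by_cases hp : p.1 = "skip"
      · simp [Function.comp, hp]
        ring
      · simp [Function.comp, hp]

theorem pv_seats_eq (np : Int) :
    ∀ (cards : List String) (pos dir : Int),
      pvSeats np pos dir cards =
        (List.range cards.length).map
          (fun i => PySem.Int.mod (pos + dir * ((pvDeltas cards).take i).sum) np) := by
  intro cards
  induction cards with
  | nil => intro pos dir; simp [pvSeats]
  | cons c rest ih =>
    intro pos dir
    simp only [pvSeats, pvDeltas, List.length_cons, List.range_succ_eq_map, List.map_cons,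
      List.map_map]
    refine List.cons_eq_cons.mpr ⟨by simp, ?_⟩
    rw [ih]
    apply List.map_congr_left
    intro i _
    simp only [Function.comp, List.take_succ_cons, List.sum_cons]
    congr 1
    rw [← List.map_take, List.sum_map_mul_left]
    simp only [List.map_id_fun', id]
    ring

theorem pv_seats_one (np : Int) (cards : List String) (st : Int) :
    (List.range cards.length).map
        (fun i => PySem.Int.mod (st + ((pvDeltas cards).take i).sum) np) = pvSeats np st 1 cards := by
  rw [pv_seats_eq]
  simp

-- ===== VERDICT (by name: the statement is the Claim_ definition above) =====
theorem uno_who_played_what_spec : Claim_equal_uno_who_played_what := by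
  intro cards np st _ hpre
  unfold Spec_uno_who_played_what
  rcases hpre with hnil | hnp
  · subst hnil
    simp [uno_who_played_what, uno_who_played_what_alt]
  · have hA : uno_who_played_what cards np st
        = (cards.foldl (pvStepB np) ((PySem.List.pyRange 0 np 1).map (fun _ => ([] : List String)), st, 1)).1 := by
      have h := pv_key cards np cards 0 ((PySem.List.pyRange 0 np 1).map (fun _ => ([] : List String))) (0 - st) 0 (by simp)
      unfold uno_who_played_what
      simpa [List.range_eq_range', pvDir, pv_mod_two] using h
    rw [hA]
    simp only [uno_who_played_what_alt, pv_signs_eq, pv_deltas_eq, pv_seats_one]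
    apply List.ext_getElem?
    intro k
    by_cases hk : k < ((PySem.List.pyRange 0 np 1).map (fun _ => ([] : List String))).length
    · rw [pv_foldB_get np hnp cards _ st 1 k hk]
      have hkr : k < np.toNat := by simpa [PySem.List.length_pyRange_one] using hk
      rw [List.getElem?_map, PySem.List.getElem?_pyRange_one]
      have hkr' : k < (np - 0).toNat := by omega
      rw [if_pos hkr', List.getElem_map]
      simp only [Option.map_some, zero_add]
      rw [← pv_grp_eq_filter]
      simp
    · have hlen : ((cards.foldl (pvStepB np) ((PySem.List.pyRange 0 np 1).map (fun _ => ([] : List String)), st, 1)).1).length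
          = ((PySem.List.pyRange 0 np 1).map (fun _ => ([] : List String))).length :=
        pv_foldB_len np cards _
      rw [List.getElem?_eq_none (by omega), List.getElem?_eq_none (by simp at hk ⊢; omega)]
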